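-- pv_equiv track=rewrite | github.com/engineerjkk/CodingTest | 프로그래머스/1/12915. 문자열 내 마음대로 정렬하기/문자열 내 마음대로 정렬하기.py | solution
-- ===== SOURCE A (Python) =====
-- def solution(strings, n):
--     answer = []
--     dic={}
--     for s in strings:
--         if s not in dic:
--             dic[s]=s[n]
--     dic=sorted(dic.items(),key = lambda x:(x[1],x[0]))
--     for key,value in dic:
--         answer.append(key)
--
--
--     return answer
-- ===== SOURCE B (Python) =====
-- def solution(strings, n):
--     buckets = {}
--     for s in strings:
--         buckets.setdefault(s[n], set()).add(s)
--     answer = []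
--     for c in sorted(buckets):
--         answer += sorted(buckets[c])
--     return answer
-- ===== Notes on version B (the rewrite author's own statement) =====
-- stated objective: alternative
-- what changed: Instead of one global stable sort of dedup'd (string, nth-char) pairs by the tuple key, B groups the strings into per-character set buckets in one pass, then walks the bucket characters in sorted order emitting each bucket's distinct strings sorted lexicographically.
import Mathlib
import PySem

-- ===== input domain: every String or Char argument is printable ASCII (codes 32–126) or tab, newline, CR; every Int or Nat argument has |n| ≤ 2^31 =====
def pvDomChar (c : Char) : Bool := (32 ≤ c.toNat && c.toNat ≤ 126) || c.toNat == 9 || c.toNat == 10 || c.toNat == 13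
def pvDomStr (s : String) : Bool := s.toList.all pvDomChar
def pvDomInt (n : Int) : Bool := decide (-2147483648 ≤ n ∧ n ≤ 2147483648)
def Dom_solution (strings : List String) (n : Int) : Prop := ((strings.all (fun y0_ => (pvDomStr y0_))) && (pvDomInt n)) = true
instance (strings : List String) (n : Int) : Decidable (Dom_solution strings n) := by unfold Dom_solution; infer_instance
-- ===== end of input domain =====

-- B groups strings into per-nth-character set buckets and emits each bucket sorted, instead of A's
-- one global sort of dedup'd (string, nth char) pairs; alternative decomposition, same results.


-- ===== PORT A =====
-- s[n]: Python raises IndexError exactly where pyGet? is none; Pre_solution excludes those inputs,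
-- so the ' ' default is never read under the claim.
def solution (strings : List String) (n : Int) : List String :=
  let dic : PySem.Dict String Char :=
    strings.foldl (fun dic s =>
      if !(dic.contains s) then dic.insert s ((PySem.Str.pyGet? s n).getD ' ') else dic)
      PySem.Dict.empty
  let dicSorted := PySem.List.sorted2 dic.items (fun x => x.2) (fun x => x.1)
  dicSorted.foldl (fun answer p => answer ++ [p.1]) []

-- ===== PORT B =====
-- buckets.setdefault(s[n], set()).add(s) is Dict.modify; buckets[c] with c a key is getD (never defaults).
def solution_alt (strings : List String) (n : Int) : List String :=
  let buckets : PySem.Dict Char (PySem.Set String) :=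
    strings.foldl (fun buckets s =>
      buckets.modify ((PySem.Str.pyGet? s n).getD ' ') PySem.Set.empty
        (fun b => PySem.Set.add b s))
      PySem.Dict.empty
  (PySem.List.sorted buckets.keys (fun c => c)).foldl
    (fun answer c => answer ++ PySem.List.sorted (buckets.getD c PySem.Set.empty) (fun s => s)) []

-- ===== PRECONDITION & SPEC =====
-- Pre_: A evaluates s[n] on (the first occurrence of) every string, so it raises IndexError
-- unless index n is in range for every element; exactly those inputs are admitted.
def Pre_solution (strings : List String) (n : Int) : Prop :=
  ∀ s ∈ strings, PySem.Raise.InRange s.toList.length n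
instance (strings : List String) (n : Int) : Decidable (Pre_solution strings n) := by
  unfold Pre_solution; infer_instance
def pvWitness_solution : List String × Int := (["sun", "bed", "car"], 1)
def Spec_solution (strings : List String) (n : Int) (out : List String) : Prop := out = solution_alt strings n
instance (strings : List String) (n : Int) (out : List String) : Decidable (Spec_solution strings n out) := by unfold Spec_solution; infer_instance

-- ===== CLAIM (what is proved, stated in full; the proofs are below) =====
def Claim_equal_solution : Prop := ∀ (strings : List String) (n : Int), Dom_solution strings n → Pre_solution strings n → Spec_solution strings n (solution strings n)

-- ===== LEMMAS AND PROOFS =====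

-- the nth-character key both programs compute for a string
def ck (n : Int) (s : String) : Char := (PySem.Str.pyGet? s n).getD ' '

-- A's dict after the first loop: items are (s, s[n]) over the distinct strings in first-occurrence order
theorem dictA_items (n : Int) (l : List String) (d : PySem.Dict String Char)
    (hd : d.items = d.keys.map (fun s => (s, ck n s))) :
    (l.foldl (fun dic s =>
      if !(dic.contains s) then dic.insert s ((PySem.Str.pyGet? s n).getD ' ') else dic) d).items
      = (PySem.Set.update d.keys l).map (fun s => (s, ck n s)) := by
  induction l generalizing d with
  | nil => simpa [PySem.Set.update_nil] using hd
  | cons s l ih =>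
    rw [List.foldl_cons, PySem.Set.update_cons]
    by_cases hc : d.contains s = true
    · rw [if_neg (by simp [hc]), PySem.Set.add_of_mem ((PySem.Dict.contains_iff_mem_keys d s).1 hc)]
      exact ih d hd
    · have hc' : d.contains s = false := by simpa using hc
      have hmem : s ∉ d.keys := fun hm => by
        simp [(PySem.Dict.contains_iff_mem_keys d s).2 hm] at hc'
      rw [if_pos (by simp [hc']), PySem.Set.add_of_not_mem hmem]
      have hinv : (d.insert s ((PySem.Str.pyGet? s n).getD ' ')).items
          = (d.insert s ((PySem.Str.pyGet? s n).getD ' ')).keys.map (fun s => (s, ck n s)) := by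
        rw [PySem.Dict.items_insert_of_not_contains d _ hc',
          PySem.Dict.keys_insert_of_not_contains d _ hc', hd, List.map_append]
        simp [ck]
      rw [ih _ hinv, PySem.Dict.keys_insert_of_not_contains d _ hc']

-- B's buckets: the keys are the distinct nth characters in first-occurrence order
theorem buckets_keys (n : Int) (strings : List String) :
    (strings.foldl (fun buckets s =>
      buckets.modify ((PySem.Str.pyGet? s n).getD ' ') PySem.Set.empty
        (fun b => PySem.Set.add b s)) PySem.Dict.empty).keys
      = PySem.Set.ofList (strings.map (ck n)) := by
  rw [PySem.Dict.keys_foldl_modify_key strings (fun s => (PySem.Str.pyGet? s n).getD ' ')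
    PySem.Set.empty (fun _ s b => PySem.Set.add b s) PySem.Dict.empty]
  simp only [PySem.Dict.keys_empty, PySem.Set.update_nil_left]
  rfl

-- B's buckets: bucket ch holds the distinct strings whose nth char is ch, in first-occurrence order
theorem buckets_getD (n : Int) (l : List String) (d : PySem.Dict Char (PySem.Set String)) (ch : Char) :
    (l.foldl (fun buckets s =>
      buckets.modify ((PySem.Str.pyGet? s n).getD ' ') PySem.Set.empty
        (fun b => PySem.Set.add b s)) d).getD ch PySem.Set.empty
      = PySem.Set.update (d.getD ch PySem.Set.empty) (l.filter (fun s => ck n s == ch)) := by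
  induction l generalizing d with
  | nil => simp [PySem.Set.update_nil]
  | cons s l ih =>
    rw [List.foldl_cons, List.filter_cons]
    by_cases h : ck n s = ch
    · have hb : (ck n s == ch) = true := by simp [h]
      rw [hb, if_pos rfl, PySem.Set.update_cons, ih]
      have : ((PySem.Str.pyGet? s n).getD ' ') = ch := h
      rw [this, PySem.Dict.getD_modify_self]
    · have hb : (ck n s == ch) = false := by simp [h]
      rw [hb, if_neg (by simp), ih]
      have hne : ch ≠ ((PySem.Str.pyGet? s n).getD ' ') := fun he => h he.symm
      rw [PySem.Dict.getD_modify_of_ne _ _ _ hne]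

-- sorted2 with the tuple key (x.2, x.1) is sorted with the lexicographic key
theorem sorted2_eq_sorted_lex (xs : List (String × Char)) :
    PySem.List.sorted2 xs (fun x => x.2) (fun x => x.1)
      = PySem.List.sorted xs (fun x => toLex (x.2, x.1)) := by
  simp only [PySem.List.sorted2, PySem.List.sorted, if_neg (by decide : ¬ (false = true))]
  have hb : (fun (a b : String × Char) =>
        decide (a.2 < b.2) || (!decide (b.2 < a.2) && decide (a.1 < b.1)))
      = (fun (a b : String × Char) =>
        decide ((toLex (a.2, a.1) : Lex (Char × String)) < toLex (b.2, b.1))) := by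
    funext a b
    rcases lt_trichotomy a.2 b.2 with h | h | h
    · simp [Prod.Lex.lt_iff, h, asymm h]
    · simp [Prod.Lex.lt_iff, h]
    · simp [Prod.Lex.lt_iff, h, asymm h, ne_of_gt h]
  rw [hb]

-- distinct elements of a filter = filter of the distinct elements
theorem ofList_filter {α : Type} [BEq α] [LawfulBEq α] (p : α → Bool) (xs : List α) :
    PySem.Set.ofList (xs.filter p) = (PySem.Set.ofList xs).filter p := by
  induction xs using List.reverseRecOn with
  | nil => simp [PySem.Set.ofList_nil]
  | append_singleton xs x ih =>
    rw [List.filter_append, PySem.Set.ofList_append_singleton]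
    by_cases hp : p x = true
    · have hfx : List.filter p [x] = [x] := by simp [hp]
      rw [hfx, PySem.Set.ofList_append_singleton, ih]
      by_cases hm : x ∈ PySem.Set.ofList xs
      · rw [PySem.Set.add_of_mem hm,
          PySem.Set.add_of_mem (by simp [List.mem_filter, hm, hp])]
      · rw [PySem.Set.add_of_not_mem hm,
          PySem.Set.add_of_not_mem (fun hmf => hm (List.mem_of_mem_filter hmf)),
          List.filter_append]
        simp [hp]
    · have hfx : List.filter p [x] = [] := by simp [hp]
      rw [hfx, List.append_nil, ih]
      by_cases hm : x ∈ PySem.Set.ofList xs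
      · rw [PySem.Set.add_of_mem hm]
      · rw [PySem.Set.add_of_not_mem hm, List.filter_append]
        simp [hp]

-- the buckets over a nodup list of characters partition the strings
theorem partition_perm (n : Int) (C : List Char) (D : List String) (hC : C.Nodup)
    (hall : ∀ s ∈ D, ck n s ∈ C) :
    (C.flatMap (fun ch => D.filter (fun s => ck n s == ch))).Perm D := by
  induction C generalizing D with
  | nil =>
    have hD : D = [] := List.eq_nil_iff_forall_not_mem.2 (fun s hs => by simpa using hall s hs)
    simp [hD]
  | cons ch C ih =>
    rw [List.flatMap_cons]
    obtain ⟨hch, hCnd⟩ := List.nodup_cons.1 hC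
    have hcongr : ∀ ch' ∈ C, D.filter (fun s => ck n s == ch')
        = (D.filter (fun s => !(ck n s == ch))).filter (fun s => ck n s == ch') := by
      intro ch' hch'
      rw [List.filter_filter]
      apply List.filter_congr
      intro s _
      have hne : ch' ≠ ch := fun h2 => hch (h2 ▸ hch')
      by_cases he : ck n s = ch'
      · simp [he, hne]
      · simp [he]
    have hflat : (C.flatMap (fun ch' => D.filter (fun s => ck n s == ch'))).Perm
        (C.flatMap (fun ch' => (D.filter (fun s => !(ck n s == ch))).filter (fun s => ck n s == ch'))) :=
      List.Perm.flatMap_left C (fun a ha => by rw [hcongr a ha])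
    have hih : (C.flatMap (fun ch' =>
        (D.filter (fun s => !(ck n s == ch))).filter (fun s => ck n s == ch'))).Perm
        (D.filter (fun s => !(ck n s == ch))) := by
      refine ih _ hCnd ?_
      intro s hs
      have hsD := List.mem_filter.1 hs
      have := hall s hsD.1
      rcases List.mem_cons.1 this with h | h
      · exact absurd h (by simpa using hsD.2)
      · exact h
    exact (List.Perm.append_left _ (hflat.trans hih)).trans (List.filter_append_perm _ D)

-- B's output is strictly increasing under the (nth char, string) lexicographic key
theorem flatMap_pairwise (n : Int) (strings : List String) (C : List Char)
    (hC : C.Pairwise (· < ·)) :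
    (C.flatMap (fun ch =>
      PySem.List.sorted (PySem.Set.ofList (strings.filter (fun s => ck n s == ch))) (fun s => s))).Pairwise
      (fun a b => (toLex (ck n a, a) : Lex (Char × String)) < toLex (ck n b, b)) := by
  induction C with
  | nil => simp
  | cons ch C ih =>
    rw [List.flatMap_cons]
    obtain ⟨hhd, htl⟩ := List.pairwise_cons.1 hC
    have hckmem : ∀ (ch' : Char) (a : String),
        a ∈ PySem.List.sorted (PySem.Set.ofList
          (strings.filter (fun s => ck n s == ch'))) (fun s => s) → ck n a = ch' := by
      intro ch' a ha
      have h1 := (PySem.List.mem_sorted _ _ _ a).1 ha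
      have h2 := (PySem.Set.mem_ofList _ a).1 h1
      simpa using (List.mem_filter.1 h2).2
    apply List.pairwise_append.2
    refine ⟨?_, ih htl, ?_⟩
    · have hp := PySem.List.sorted_ofList_pairwise_lt
        (strings.filter (fun s => ck n s == ch))
      refine List.Pairwise.imp_of_mem ?_ hp
      intro a b ha hb hab
      have h1 : ck n a = ch := hckmem ch a ha
      have h2 : ck n b = ch := hckmem ch b hb
      rw [Prod.Lex.lt_iff]
      refine Or.inr ⟨?_, ?_⟩ <;> simp [h1, h2, hab]
    · intro a ha b hb
      obtain ⟨ch', hch', hb'⟩ := List.mem_flatMap.1 hb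
      rw [Prod.Lex.lt_iff]
      refine Or.inl ?_
      simpa [hckmem ch a ha, hckmem ch' b hb'] using hhd ch' hch'

-- ===== VERDICT (by name: the statement is the Claim_ definition above) =====
theorem solution_spec : Claim_equal_solution := by
  intro strings n hdom hpre
  unfold Spec_solution solution solution_alt
  dsimp only
  -- A's side: items of the dedup dict are the distinct strings paired with their nth chars
  rw [dictA_items n strings PySem.Dict.empty rfl]
  simp only [PySem.Dict.keys_empty, PySem.Set.update_nil_left]
  -- B's side: keys and buckets of the grouping dict
  rw [buckets_keys n strings]
  have hbucket : ∀ ch : Char,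
      ((strings.foldl (fun buckets s =>
        buckets.modify ((PySem.Str.pyGet? s n).getD ' ') PySem.Set.empty
          (fun b => PySem.Set.add b s)) PySem.Dict.empty).getD ch PySem.Set.empty)
      = PySem.Set.ofList (strings.filter (fun s => ck n s == ch)) := by
    intro ch
    rw [buckets_getD n strings PySem.Dict.empty ch]
    simp [PySem.Dict.getD_empty, PySem.Set.update_nil_left]
  simp only [hbucket]
  -- turn both accumulation loops into map / flatMap
  rw [PySem.List.foldl_append_singleton_eq_map (fun p : String × Char => p.1),
    PySem.List.foldl_append_eq_flatMap (fun ch : Char =>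
      PySem.List.sorted (PySem.Set.ofList (strings.filter (fun s => ck n s == ch))) (fun s => s)),
    List.nil_append, List.nil_append, sorted2_eq_sorted_lex]
  -- name B's output
  set C := PySem.List.sorted (PySem.Set.ofList (strings.map (ck n))) (fun c => c) with hc
  set ys := C.flatMap (fun ch => PySem.List.sorted
    (PySem.Set.ofList (strings.filter (fun s => ck n s == ch))) (fun s => s)) with hys
  -- ys is a permutation of the distinct strings
  have hperm : ys.Perm (PySem.Set.ofList strings) := by
    have h1 : ys.Perm (C.flatMap (fun ch =>
        (PySem.Set.ofList strings).filter (fun s => ck n s == ch))) := by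
      apply List.Perm.flatMap_left
      intro ch _
      exact (PySem.List.sorted_perm _ _ _).trans (by rw [ofList_filter])
    refine h1.trans (partition_perm n C (PySem.Set.ofList strings) ?_ ?_)
    · rw [hc]
      exact ((PySem.List.sorted_perm _ _ _).nodup_iff).2 (PySem.Set.nodup_ofList _)
    · intro s hs
      rw [hc, PySem.List.mem_sorted, PySem.Set.mem_ofList]
      exact List.mem_map_of_mem ((PySem.Set.mem_ofList _ s).1 hs)
  -- ys is strictly increasing under the lexicographic (nth char, string) key
  have hpair := flatMap_pairwise n strings C
    (by rw [hc]; exact PySem.List.sorted_ofList_pairwise_lt _)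
  -- A's sorted pair list is exactly ys paired with its keys
  have hsorted : PySem.List.sorted
      ((PySem.Set.ofList strings).map (fun s => (s, ck n s))) (fun x => toLex (x.2, x.1))
      = ys.map (fun s => (s, ck n s)) := by
    apply PySem.List.sorted_eq_of_perm_of_pairwise_lt
    · exact hperm.map _
    · rw [List.pairwise_map]
      exact hpair
  rw [hsorted, List.map_map]
  have hid : ((fun p : String × Char => p.1) ∘ (fun s => (s, ck n s))) = id := rfl
  rw [hid, List.map_id]
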